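-- pv_equiv track=rewrite | github.com/revacprogramming/python01-ahp2808 | ActivitySet03/problem03.py | list_of_str
-- ===== SOURCE A (Python) =====
-- def list_of_str(str):   #returns list with string broke in increasing order of elements
--     pals=''
--     pls3=[]
--     for x in str:
--         pals+=x
--         if len(pals)>=3:
--             pls3.append(pals)
--     return pls3
-- ===== SOURCE B (Python) =====
-- def list_of_str(str):   # prefixes of length >= 3, by slicing over an index range
--     return [str[:i] for i in range(3, len(str) + 1)]
-- ===== Notes on version B (the rewrite author's own statement) =====
-- stated objective: idiomatic
-- what changed: B builds each prefix by slicing the original string over the index range 3..len(s), instead of growing a character accumulator inside a per-character loop with a length test.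
import Mathlib
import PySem

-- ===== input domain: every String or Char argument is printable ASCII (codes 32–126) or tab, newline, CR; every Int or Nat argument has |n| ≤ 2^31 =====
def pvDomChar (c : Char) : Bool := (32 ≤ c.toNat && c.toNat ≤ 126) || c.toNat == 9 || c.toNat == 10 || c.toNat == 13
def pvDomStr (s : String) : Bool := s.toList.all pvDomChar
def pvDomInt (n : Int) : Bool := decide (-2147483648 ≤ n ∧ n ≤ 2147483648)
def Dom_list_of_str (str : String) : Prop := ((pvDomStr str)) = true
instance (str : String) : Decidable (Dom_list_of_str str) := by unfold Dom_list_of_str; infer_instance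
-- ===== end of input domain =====

-- B replaces A's per-character accumulator loop by slicing the string over the
-- prefix-length range 3..len(s) (idiomatic; same cost).

-- ===== PORT A =====
-- one loop step: pals += x; if len(pals) >= 3: pls3.append(pals)
def listOfStrStep (st : List Char × List String) (x : Char) : List Char × List String :=
  let pals := st.1 ++ [x]
  (pals, if 3 ≤ pals.length then st.2 ++ [String.ofList pals] else st.2)

def list_of_str (str : String) : List String :=
  (str.toList.foldl listOfStrStep ([], [])).2

-- ===== PORT B =====
def list_of_str_alt (str : String) : List String :=
  (PySem.List.pyRange 3 (PySem.Str.len str + 1) 1).map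
    (fun i => PySem.Str.slice str none (some i))

-- ===== PRECONDITION & SPEC =====
def Spec_list_of_str (str : String) (out : List String) : Prop := out = list_of_str_alt str
instance (str : String) (out : List String) : Decidable (Spec_list_of_str str out) := by unfold Spec_list_of_str; infer_instance

-- ===== CLAIM (what is proved, stated in full; the proofs are below) =====
def Claim_equal_list_of_str : Prop := ∀ (str : String), Dom_list_of_str str → Spec_list_of_str str (list_of_str str)

-- ===== LEMMAS AND PROOFS =====

-- the loop invariant of A, specialised to the initial state: after consuming cs,
-- pals is cs itself and pls3 is exactly the prefixes of length 3..len(cs)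
lemma list_of_str_loop (cs : List Char) :
    cs.foldl listOfStrStep ([], []) =
      (cs, (PySem.List.pyRange 3 ((cs.length : Int) + 1) 1).map
            (fun i => String.ofList (cs.take i.toNat))) := by
  induction cs using List.reverseRecOn with
  | nil =>
      simp [PySem.List.pyRange_one_eq_nil (by omega : (1:Int) ≤ 3)]
  | append_singleton cs c ih =>
      rw [List.foldl_append, ih]
      simp only [List.foldl_cons, List.foldl_nil, listOfStrStep]
      by_cases h : 2 ≤ cs.length
      · rw [show ((cs ++ [c]).length : Int) + 1 = ((cs.length : Int) + 1) + 1 by simp,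
            PySem.List.pyRange_one_succ_right (by omega : (3:Int) ≤ (cs.length : Int) + 1)]
        rw [if_pos (show 3 ≤ (cs ++ [c]).length by simp; omega)]
        simp only [List.map_append, List.map_cons, List.map_nil, Prod.mk.injEq, true_and]
        congr 1
        · refine List.map_congr_left (fun i hi => ?_)
          have := (PySem.List.mem_pyRange_one).mp hi
          have hle : i.toNat ≤ cs.length := by omega
          rw [List.take_append_of_le_length hle]
        · have ht : ((cs.length : Int) + 1).toNat = cs.length + 1 := by omega
          rw [ht, List.take_of_length_le (by simp)]
      · rw [if_neg (show ¬ 3 ≤ (cs ++ [c]).length by simp; omega)]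
        have hnil1 : PySem.List.pyRange 3 ((cs.length : Int) + 1) 1 = [] :=
          PySem.List.pyRange_one_eq_nil (by omega)
        have hnil2 : PySem.List.pyRange 3 ((cs.length : Int) + 1 + 1) 1 = [] :=
          PySem.List.pyRange_one_eq_nil (by omega)
        simp [hnil1, hnil2]

lemma slice_eq_take (s : String) (i : Int) (h : 0 ≤ i) :
    PySem.Str.slice s none (some i) = String.ofList (s.toList.take i.toNat) := by
  apply String.toList_inj.mp
  simp [PySem.Str.slice, PySem.List.slice_to _ h]

-- ===== VERDICT (by name: the statement is the Claim_ definition above) =====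
theorem list_of_str_spec : Claim_equal_list_of_str := by
  intro str _
  unfold Spec_list_of_str list_of_str list_of_str_alt
  rw [list_of_str_loop]
  simp only [PySem.Str.len_eq]
  refine List.map_congr_left (fun i hi => ?_)
  have := (PySem.List.mem_pyRange_one).mp hi
  rw [slice_eq_take str i (by omega)]
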